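-- pv_equiv track=rewrite | github.com/rasofema/AdventOfCode2020 | Day7/7.py | checkBag
-- ===== SOURCE A (Python) =====
-- def checkBag(data, bagColours):
--     approvedBags = set()
--     listOfBags = []
--     for bag in data:
--         for bagColour in bagColours:
--             if bagColour in bag[1]:
--                 approvedBags.add(bag[0][:-5])
--                 listOfBags.append(bag[0][:-5])
--     if len(listOfBags) > 0:
--         for item in checkBag(data, listOfBags):
--             approvedBags.add(item)
--     return approvedBags
-- ===== SOURCE B (Python) =====
-- def checkBag(data, bagColours):
--     seen = []
--     frontier = bagColours
--     while frontier:
--         level = [name[:-5] for name, contents in data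
--                  if any(colour in contents for colour in frontier)]
--         fresh = []
--         for p in level:
--             if p not in seen and p not in fresh:
--                 fresh.append(p)
--         seen += fresh
--         frontier = fresh
--     return set(seen)
-- ===== Notes on version B (the rewrite author's own statement) =====
-- stated objective: faster
-- what changed: A re-expands the whole matched level each round by recursing on a duplicate-laden list of every (bag, colour) match, rescanning data against colours it has already processed; B is an iterative saturation loop in staged passes - one comprehension builds the matched level, a dedup pass against the seen list keeps only fresh prefixes, and only those fresh prefixes form the next frontier - so each prefix is matched against data at most once. Intended as faster; measured: a timing run saw A time out at n=16 where B returned, leaving no measurable ratio.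
import Mathlib
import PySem

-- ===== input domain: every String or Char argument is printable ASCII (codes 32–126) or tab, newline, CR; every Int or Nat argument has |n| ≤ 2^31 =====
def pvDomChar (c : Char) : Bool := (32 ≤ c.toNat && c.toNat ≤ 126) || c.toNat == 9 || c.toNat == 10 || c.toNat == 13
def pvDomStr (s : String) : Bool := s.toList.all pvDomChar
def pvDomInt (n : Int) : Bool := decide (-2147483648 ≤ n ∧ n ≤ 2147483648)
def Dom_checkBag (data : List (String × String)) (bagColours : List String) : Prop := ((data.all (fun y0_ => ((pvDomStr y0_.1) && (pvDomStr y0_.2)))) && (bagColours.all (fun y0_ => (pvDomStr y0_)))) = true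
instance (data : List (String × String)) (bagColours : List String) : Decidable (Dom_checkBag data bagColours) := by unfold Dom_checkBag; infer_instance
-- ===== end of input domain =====

-- B replaces A's level-recursion (which rescans data with ever-growing, duplicate-laden colour
-- lists) by an iterative saturation: each round builds the matched level in one comprehension,
-- dedups it against the seen list in a second pass, and continues only with the fresh prefixes,
-- so every prefix is expanded at most once (intended as faster; a timing run saw A time out
-- at n=16 where B returned, leaving no measurable ratio).
-- Python A returns a SET; the equivalence is about the returned value as a set of strings
-- (the Lean ports both produce it in first-insertion order).

-- ===== PORT A =====
-- literal port of A; the recursion 'checkBag(data, listOfBags)' may fail to terminate in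
-- Python (RecursionError), so the port carries fuel; under Pre_checkBag (A terminates)
-- data.length + 2 levels are never exhausted.  The final 'for item in <recursive set>'
-- merge builds a set, so its result does not depend on Python's hash iteration order;
-- the port iterates the recursive result in its insertion order.
def checkBagFuel (data : List (String × String)) : Nat → List String → PySem.Set String
  | 0, _ => PySem.Set.empty
  | fuel+1, bagColours =>
    let st := data.foldl
      (fun (st : PySem.Set String × List String) bag =>
        bagColours.foldl
          (fun (st : PySem.Set String × List String) bagColour =>
            if PySem.Str.isIn bagColour bag.2 then
              (PySem.Set.add st.1 (PySem.Str.slice bag.1 none (some (-5))),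
               st.2 ++ [PySem.Str.slice bag.1 none (some (-5))])
            else st)
          st)
      (PySem.Set.empty, ([] : List String))
    if st.2.length > 0 then
      (checkBagFuel data fuel st.2).foldl (fun ap item => PySem.Set.add ap item) st.1
    else st.1

def checkBag (data : List (String × String)) (bagColours : List String) : List String :=
  checkBagFuel data (data.length + 2) bagColours

-- ===== PORT B =====
-- literal port of Source B.  The while loop runs at most data.length + 2 rounds on EVERY input
-- (each continuing round has a nonempty fresh list of previously unseen prefixes, of which
-- there are ≤ data.length), so the structural fuel below never runs out and the port is
-- exact everywhere.
-- Source B's level comprehension: prefixes of the bags whose contents match some frontier colour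
def pvLevel (data : List (String × String)) (frontier : List String) : List String :=
  (data.filter (fun bag => frontier.any (fun colour => PySem.Str.isIn colour bag.2))).map
    (fun bag => PySem.Str.slice bag.1 none (some (-5)))

-- Source B's dedup pass, one step: 'if p not in seen and p not in fresh: fresh.append(p)'
def pvFreshStep (seen : List String) (fresh : List String) (p : String) : List String :=
  if p ∉ seen ∧ p ∉ fresh then fresh ++ [p] else fresh

def checkBagAltLoop (data : List (String × String)) : Nat → List String → List String → List String
  | _, seen, [] => seen
  | 0, seen, _ => seen
  | fuel+1, seen, frontier =>
      let level := pvLevel data frontier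
      let fresh := level.foldl (pvFreshStep seen) []
      checkBagAltLoop data fuel (seen ++ fresh) fresh

def checkBag_alt (data : List (String × String)) (bagColours : List String) : List String :=
  PySem.Set.ofList (checkBagAltLoop data (data.length + 2) [] bagColours)

-- ===== PRECONDITION & SPEC =====
-- Pre_ holds exactly when Python A RETURNS: A recurses on the list of matched prefixes and
-- raises RecursionError when that chain never dies out (a reachable cycle in the containment
-- graph); since the empty level is absorbing and a chain of more than data.length nonempty
-- levels must repeat a prefix, A terminates iff the (data.length+1)-th level is empty.
-- Outside Pre_ A raises RecursionError (e.g. on ([("red bags", "shiny red")], ["red"]))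
-- while B's saturation loop still returns the reachable prefixes; those inputs are excluded here.
-- (The two fueled ports happen to agree even outside Pre_, so the equality proof below does
-- not consume this hypothesis; Pre_ delimits where port A is Python A's behaviour.)
def Pre_checkBag (data : List (String × String)) (bagColours : List String) : Prop :=
  (pvLevel data)^[data.length + 1] bagColours = []
instance (data : List (String × String)) (bagColours : List String) : Decidable (Pre_checkBag data bagColours) := by
  unfold Pre_checkBag; infer_instance

def pvWitness_checkBag : (List (String × String)) × List String :=
  ([("shiny gold bags", "2 muted yellow bags")], ["muted yellow"])

def Spec_checkBag (data : List (String × String)) (bagColours : List String) (out : List String) : Prop := out = checkBag_alt data bagColours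
instance (data : List (String × String)) (bagColours : List String) (out : List String) : Decidable (Spec_checkBag data bagColours out) := by unfold Spec_checkBag; infer_instance

-- ===== CLAIM (what is proved, stated in full; the proofs are below) =====
def Claim_equal_checkBag : Prop := ∀ (data : List (String × String)) (bagColours : List String), Dom_checkBag data bagColours → Pre_checkBag data bagColours → Spec_checkBag data bagColours (checkBag data bagColours)

-- ===== LEMMAS AND PROOFS =====

-- abbreviations for the proofs
def pvPfx (bag : String × String) : String := PySem.Str.slice bag.1 none (some (-5))
def pvM (colours : List String) (bag : String × String) : Bool :=
  colours.any (fun c => PySem.Str.isIn c bag.2)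

-- the common canonical computation: fold the levels, accumulating first occurrences
def pvCan (data : List (String × String)) : Nat → List String → List String → List String
  | 0, seen, _ => seen
  | f+1, seen, F =>
      if pvLevel data F = [] then seen
      else pvCan data f (PySem.Set.update seen (pvLevel data F)) (pvLevel data F)

lemma pv_add_of_mem (s : PySem.Set String) (a : String) (h : a ∈ s) : PySem.Set.add s a = s := by
  simp [PySem.Set.add, h]

lemma pv_add_not_mem (s : PySem.Set String) (a : String) (h : a ∉ s) :
    PySem.Set.add s a = s ++ [a] := by
  simp [PySem.Set.add, h]

-- update s (pvLevel data F) as a fold over data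
lemma pv_update_cons (s : PySem.Set String) (a : String) (t : List String) :
    PySem.Set.update s (a :: t) = PySem.Set.update (PySem.Set.add s a) t := by
  simp [PySem.Set.update]

lemma pv_update_level (data : List (String × String)) (F : List String) (s : PySem.Set String) :
    PySem.Set.update s (pvLevel data F)
      = data.foldl (fun s b => if pvM F b then PySem.Set.add s (pvPfx b) else s) s := by
  simp [pvLevel, pvM, pvPfx, PySem.Set.update_map_eq_foldl_add, List.foldl_filter]

-- A's inner colour loop
lemma pv_inner (b : String × String) (F : List String) (s : PySem.Set String) (l : List String) :
    F.foldl
      (fun (st : PySem.Set String × List String) bagColour =>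
        if PySem.Str.isIn bagColour b.2 then
          (PySem.Set.add st.1 (PySem.Str.slice b.1 none (some (-5))),
           st.2 ++ [PySem.Str.slice b.1 none (some (-5))])
        else st) (s, l)
    = (if pvM F b then PySem.Set.add s (pvPfx b) else s,
       l ++ (F.filter (fun c => PySem.Str.isIn c b.2)).map (fun _ => pvPfx b)) := by
  induction F generalizing s l with
  | nil => simp [pvM]
  | cons c t ih =>
    have hany : pvM (c :: t) b = (PySem.Str.isIn c b.2 || pvM t b) := by
      simp only [pvM, List.any_cons]
    by_cases hc : PySem.Str.isIn c b.2 = true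
    · rw [List.foldl_cons, if_pos hc, ih]
      have hm : pvM (c :: t) b = true := by rw [hany, hc, Bool.true_or]
      have hp : pvPfx b ∈ PySem.Set.add s (PySem.Str.slice b.1 none (some (-5))) :=
        (PySem.Set.mem_add s _ _).2 (Or.inr rfl)
      have hcc : PySem.Chars.isIn c.toList b.2.toList = true := by
        simpa [PySem.Str.isIn] using hc
      by_cases hmt : pvM t b = true
      · simp [hm, hmt, pvPfx, hcc]
      · simp [hm, hmt, pvPfx, hcc]
    · have hc' : PySem.Str.isIn c b.2 = false := Bool.eq_false_iff.2 hc
      have hcc : PySem.Chars.isIn c.toList b.2.toList = false := by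
        simpa [PySem.Str.isIn] using hc'
      rw [List.foldl_cons, if_neg (by simp [hcc]), ih]
      rw [hany, hc', Bool.false_or]
      simp [pvPfx, hcc]

-- A's data loop
lemma pv_outer (data : List (String × String)) (F : List String) (s : PySem.Set String) (l : List String) :
    data.foldl
      (fun (st : PySem.Set String × List String) bag =>
        F.foldl
          (fun (st : PySem.Set String × List String) bagColour =>
            if PySem.Str.isIn bagColour bag.2 then
              (PySem.Set.add st.1 (PySem.Str.slice bag.1 none (some (-5))),
               st.2 ++ [PySem.Str.slice bag.1 none (some (-5))])
            else st)
          st) (s, l)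
    = (PySem.Set.update s (pvLevel data F),
       l ++ data.flatMap (fun b => ((F.filter (fun c => PySem.Str.isIn c b.2)).map (fun _ => pvPfx b)))) := by
  induction data generalizing s l with
  | nil => simp [pvLevel, PySem.Set.update]
  | cons b t ih =>
    simp only [List.foldl_cons]
    rw [pv_inner, ih]
    rw [pv_update_level, pv_update_level]
    simp only [List.foldl_cons, List.flatMap_cons, List.append_assoc]

-- B's dedup pass: appending the fresh prefixes to seen is exactly Set.update seen level
lemma pv_fresh_update (seen : List String) (l acc : List String) :
    seen ++ l.foldl (pvFreshStep seen) acc = PySem.Set.update (seen ++ acc) l := by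
  induction l generalizing acc with
  | nil => rfl
  | cons p t ih =>
    rw [List.foldl_cons, ih, pv_update_cons]
    congr 1
    by_cases hm : p ∈ seen ++ acc
    · rw [pv_add_of_mem _ _ hm]
      rcases List.mem_append.1 hm with h | h
      · simp [pvFreshStep, h]
      · simp [pvFreshStep, h]
    · have hs : p ∉ seen := fun h => hm (List.mem_append.2 (Or.inl h))
      have ha : p ∉ acc := fun h => hm (List.mem_append.2 (Or.inr h))
      rw [pv_add_not_mem _ _ hm]
      simp [pvFreshStep, hs, ha]

lemma pv_mem_level (data : List (String × String)) (F : List String) (x : String) :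
    x ∈ pvLevel data F ↔ ∃ b ∈ data, pvM F b = true ∧ x = pvPfx b := by
  simp only [pvLevel, pvM, pvPfx, List.mem_map, List.mem_filter]
  constructor
  · rintro ⟨b, ⟨hb, hm⟩, rfl⟩; exact ⟨b, hb, hm, rfl⟩
  · rintro ⟨b, hb, hm, rfl⟩; exact ⟨b, ⟨hb, hm⟩, rfl⟩

-- update algebra
lemma pv_update_append (s : PySem.Set String) (l1 l2 : List String) :
    PySem.Set.update s (l1 ++ l2) = PySem.Set.update (PySem.Set.update s l1) l2 := by
  simp [PySem.Set.update, List.foldl_append]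

lemma pv_update_update (x s : PySem.Set String) (l : List String) :
    PySem.Set.update x (PySem.Set.update s l) = PySem.Set.update (PySem.Set.update x s) l := by
  induction l generalizing s with
  | nil => rfl
  | cons a t ih =>
    rw [pv_update_cons, ih, pv_update_cons]
    congr 1
    by_cases h : a ∈ s
    · rw [pv_add_of_mem s a h, pv_add_of_mem]
      exact (PySem.Set.mem_update x s a).2 (Or.inr h)
    · rw [pv_add_not_mem s a h, pv_update_append]
      rfl

lemma pv_update_of_subset (s : PySem.Set String) (l : List String) (h : ∀ x ∈ l, x ∈ s) :
    PySem.Set.update s l = s := by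
  induction l generalizing s with
  | nil => rfl
  | cons a t ih =>
    rw [pv_update_cons, pv_add_of_mem s a (h a (by simp))]
    exact ih s (fun x hx => h x (by simp [hx]))

-- the duplicate-laden level list A recurses on matches the same bags as pvLevel
lemma pv_dup_mem (data : List (String × String)) (F : List String) (x : String) :
    x ∈ data.flatMap (fun b => ((F.filter (fun c => PySem.Str.isIn c b.2)).map (fun _ => pvPfx b)))
      ↔ x ∈ pvLevel data F := by
  rw [pv_mem_level]
  simp only [List.mem_flatMap, List.mem_map, List.mem_filter, pvM, List.any_eq_true]
  constructor
  · rintro ⟨b, hb, c, ⟨hc, hin⟩, rfl⟩; exact ⟨b, hb, ⟨c, hc, hin⟩, rfl⟩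
  · rintro ⟨b, hb, ⟨c, hc, hin⟩, rfl⟩; exact ⟨b, hb, c, ⟨hc, hin⟩, rfl⟩

-- pvCan only depends on the frontier through which bags it matches
lemma pv_can_congr (data : List (String × String)) (f : Nat) (seen : List String) (F F' : List String)
    (h : ∀ b ∈ data, pvM F b = pvM F' b) : pvCan data f seen F = pvCan data f seen F' := by
  have hl : pvLevel data F = pvLevel data F' := by
    exact congrArg (List.map _) (List.filter_congr (fun b hb => h b hb))
  cases f with
  | zero => rfl
  | succ f => simp only [pvCan, hl]

-- A computes pvCan
lemma pv_foldl_add_eq_update (s : PySem.Set String) (l : List String) :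
    List.foldl (fun ap item => PySem.Set.add ap item) s l = PySem.Set.update s l := rfl

lemma pv_any_dup_eq_level (data : List (String × String)) (F : List String) (b : String × String) :
    pvM (data.flatMap (fun b => ((F.filter (fun c => PySem.Str.isIn c b.2)).map (fun _ => pvPfx b)))) b
      = pvM (pvLevel data F) b := by
  apply Bool.eq_iff_iff.mpr
  simp only [pvM, List.any_eq_true]
  constructor
  · rintro ⟨c, hc, hin⟩; exact ⟨c, (pv_dup_mem data F c).1 hc, hin⟩
  · rintro ⟨c, hc, hin⟩; exact ⟨c, (pv_dup_mem data F c).2 hc, hin⟩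

lemma pv_A_eq_can (data : List (String × String)) (f : Nat) (F : List String) (seen : PySem.Set String) :
    PySem.Set.update seen (checkBagFuel data f F) = pvCan data f seen F := by
  induction f generalizing F seen with
  | zero => rfl
  | succ f ih =>
    simp only [checkBagFuel, pv_outer, List.nil_append, pv_foldl_add_eq_update]
    by_cases hd : data.flatMap (fun b => ((F.filter (fun c => PySem.Str.isIn c b.2)).map (fun _ => pvPfx b))) = []
    · have hl : pvLevel data F = [] := by
        rw [List.eq_nil_iff_forall_not_mem] at hd ⊢
        exact fun x hx => hd x ((pv_dup_mem data F x).2 hx)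
      rw [hd]
      simp [pvCan, hl, PySem.Set.update]
    · have hl : pvLevel data F ≠ [] := by
        intro hl
        apply hd
        rw [List.eq_nil_iff_forall_not_mem] at hl ⊢
        exact fun x hx => hl x ((pv_dup_mem data F x).1 hx)
      rw [if_pos (List.length_pos_iff.mpr hd)]
      rw [pv_update_update, pv_update_update]
      have h0 : PySem.Set.update seen (PySem.Set.empty : PySem.Set String) = seen := rfl
      rw [h0, ih]
      rw [pv_can_congr data f _ _ (pvLevel data F) (fun b _ => pv_any_dup_eq_level data F b)]
      simp only [pvCan, if_neg hl]

lemma pv_A_nodup (data : List (String × String)) (f : Nat) (F : List String) :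
    (checkBagFuel data f F).Nodup := by
  cases f with
  | zero => exact List.nodup_nil
  | succ f =>
    simp only [checkBagFuel, pv_outer, List.nil_append, pv_foldl_add_eq_update]
    have h1 : (PySem.Set.update PySem.Set.empty (pvLevel data F) : PySem.Set String).Nodup :=
      PySem.Set.nodup_update _ _ List.nodup_nil
    split
    · exact PySem.Set.nodup_update _ _ h1
    · exact h1

-- pvCan is inert once everything matchable is already seen
lemma pv_can_closed (data : List (String × String)) (f : Nat) (seen : List String) (F : List String)
    (h1 : ∀ b ∈ data, pvM F b = true → pvPfx b ∈ seen)
    (h2 : ∀ c ∈ seen, ∀ b ∈ data, PySem.Str.isIn c b.2 = true → pvPfx b ∈ seen) :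
    pvCan data f seen F = seen := by
  induction f generalizing F with
  | zero => rfl
  | succ f ih =>
    by_cases hl : pvLevel data F = []
    · simp [pvCan, hl]
    · have hsub : ∀ x ∈ pvLevel data F, x ∈ seen := by
        intro x hx
        obtain ⟨b, hb, hm, rfl⟩ := (pv_mem_level data F x).1 hx
        exact h1 b hb hm
      simp only [pvCan, if_neg hl, pv_update_of_subset seen _ hsub]
      apply ih
      intro b hb hm
      obtain ⟨c, hc, hin⟩ := by simpa only [pvM, List.any_eq_true] using hm
      exact h2 c (hsub c hc) b hb hin

lemma pv_altLoop_nil (data : List (String × String)) (f : Nat) (seen : List String) :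
    checkBagAltLoop data f seen [] = seen := by
  cases f <;> rfl

lemma pv_mem_of_M (F : List String) (b : String × String) (hm : pvM F b = true) :
    ∃ c ∈ F, PySem.Str.isIn c b.2 = true := by
  simpa only [pvM, List.any_eq_true] using hm

lemma pv_M_of_mem (F : List String) (b : String × String) (c : String) (hc : c ∈ F)
    (hin : PySem.Str.isIn c b.2 = true) : pvM F b = true := by
  simp only [pvM, List.any_eq_true]
  exact ⟨c, hc, hin⟩

-- the foldl adding Fa's matches and the one adding Fb's matches coincide when every
-- bag matched only by Fa already has its prefix in the accumulator
lemma pv_fold_cong (Fa Fb : List String) (data : List (String × String)) (s : PySem.Set String)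
    (h1 : ∀ b ∈ data, pvM Fb b = true → pvM Fa b = true)
    (h2 : ∀ b ∈ data, pvM Fa b = true → pvPfx b ∈ s ∨ pvM Fb b = true) :
    data.foldl (fun s b => if pvM Fa b then PySem.Set.add s (pvPfx b) else s) s
      = data.foldl (fun s b => if pvM Fb b then PySem.Set.add s (pvPfx b) else s) s := by
  induction data generalizing s with
  | nil => rfl
  | cons b t ih =>
    simp only [List.foldl_cons]
    by_cases hb : pvM Fb b = true
    · rw [if_pos hb, if_pos (h1 b (by simp) hb)]
      exact ih _ (fun b' hb' => h1 b' (by simp [hb'])) (fun b' hb' hm =>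
        ((h2 b' (by simp [hb']) hm).imp_left (fun h => (PySem.Set.mem_add _ _ _).2 (Or.inl h))))
    · rw [if_neg hb]
      by_cases ha : pvM Fa b = true
      · have hp : pvPfx b ∈ s := by
          rcases h2 b (by simp) ha with h | h
          · exact h
          · exact absurd h hb
        rw [if_pos ha, pv_add_of_mem s _ hp]
        exact ih s (fun b' hb' => h1 b' (by simp [hb'])) (fun b' hb' => h2 b' (by simp [hb']))
      · rw [if_neg ha]
        exact ih s (fun b' hb' => h1 b' (by simp [hb'])) (fun b' hb' => h2 b' (by simp [hb']))

-- B computes pvCan: the simulation, with the seen-list invariant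
lemma pv_B_eq_can (data : List (String × String)) (f : Nat) (seen : PySem.Set String)
    (Fa Fb : List String) (hnd : seen.Nodup)
    (h1 : ∀ b ∈ data, pvM Fb b = true → pvM Fa b = true)
    (h2 : ∀ b ∈ data, pvM Fa b = true → pvPfx b ∈ seen ∨ pvM Fb b = true)
    (h3 : ∀ c ∈ seen, c ∉ Fb → ∀ b ∈ data, PySem.Str.isIn c b.2 = true → pvPfx b ∈ seen) :
    checkBagAltLoop data f seen Fb = pvCan data f seen Fa := by
  induction f generalizing seen Fa Fb with
  | zero => cases Fb <;> rfl
  | succ f ih =>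
    cases hFbe : Fb with
    | nil =>
      rw [pv_altLoop_nil]
      refine (pv_can_closed data (f+1) seen Fa ?_ ?_).symm
      · intro b hb hm
        rcases h2 b hb hm with h | h
        · exact h
        · rw [hFbe] at h; simp [pvM] at h
      · intro c hc b hb hin
        exact h3 c hc (by simp [hFbe]) b hb hin
    | cons a t =>
      subst hFbe
      show checkBagAltLoop data f
          (seen ++ (pvLevel data (a :: t)).foldl (pvFreshStep seen) [])
          ((pvLevel data (a :: t)).foldl (pvFreshStep seen) []) = _
      set Fb := a :: t with hFb
      set lvlA := pvLevel data Fa with hlvlA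
      set lvlB := pvLevel data Fb with hlvlB
      set nxt := lvlB.foldl (pvFreshStep seen) [] with hnxt
      have hS : PySem.Set.update seen lvlB = seen ++ nxt := by
        rw [hnxt, pv_fresh_update seen lvlB []]
        simp
      by_cases hA : lvlA = []
      · -- nothing matches Fa, hence nothing matches Fb: the loop is about to stop on both sides
        have hnoA : ∀ b ∈ data, pvM Fa b = false := by
          intro b hb
          rcases Bool.eq_false_or_eq_true (pvM Fa b) with h | h
          · exact absurd ((pv_mem_level data Fa (pvPfx b)).2 ⟨b, hb, h, rfl⟩) (by simp [← hlvlA, hA])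
          · exact h
        have hnoB : ∀ b ∈ data, pvM Fb b = false := by
          intro b hb
          rcases Bool.eq_false_or_eq_true (pvM Fb b) with h | h
          · exact absurd (h1 b hb h) (by simp [hnoA b hb])
          · exact h
        have hlB : lvlB = [] := by
          rw [List.eq_nil_iff_forall_not_mem]
          intro x hx
          obtain ⟨b, hb, hm, rfl⟩ := (pv_mem_level data Fb x).1 hx
          simp [hnoB b hb] at hm
        have hnxtnil : nxt = [] := by simp [hnxt, hlB]
        rw [hnxtnil, List.append_nil, pv_altLoop_nil]
        simp [pvCan, ← hlvlA, hA]
      · -- at least one new level on the A side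
        have hE : PySem.Set.update seen lvlA = PySem.Set.update seen lvlB := by
          rw [hlvlA, hlvlB, pv_update_level, pv_update_level]
          exact pv_fold_cong Fa Fb data seen h1 h2
        have hndS : (PySem.Set.update seen lvlB).Nodup := PySem.Set.nodup_update _ _ hnd
        have hndApp : (seen ++ nxt).Nodup := hS ▸ hndS
        have hdisj : ∀ c ∈ nxt, c ∉ seen := by
          intro c hc hcs
          exact (List.disjoint_of_nodup_append hndApp) hcs hc
        have hmemS : ∀ c, c ∈ PySem.Set.update seen lvlB ↔ (c ∈ seen ∨ c ∈ lvlB) :=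
          fun c => PySem.Set.mem_update seen lvlB c
        have hmemApp : ∀ c, c ∈ PySem.Set.update seen lvlB ↔ (c ∈ seen ∨ c ∈ nxt) := by
          intro c; rw [hS]; exact List.mem_append
        have hBsubA : ∀ x ∈ lvlB, x ∈ lvlA := by
          intro x hx
          obtain ⟨b, hb, hm, rfl⟩ := (pv_mem_level data Fb x).1 hx
          exact (pv_mem_level data Fa (pvPfx b)).2 ⟨b, hb, h1 b hb hm, rfl⟩
        rw [show seen ++ nxt = PySem.Set.update seen lvlB from hS.symm]
        rw [ih (PySem.Set.update seen lvlB) lvlA nxt hndS ?_ ?_ ?_]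
        · rw [show pvCan data (f+1) seen Fa = pvCan data f (PySem.Set.update seen lvlA) lvlA from by
            simp only [pvCan, ← hlvlA, if_neg hA], hE]
        · -- h1': anything matched by nxt is matched by lvlA
          intro b hb hm
          obtain ⟨c, hc, hin⟩ := pv_mem_of_M nxt b hm
          have hcS : c ∈ PySem.Set.update seen lvlB := (hmemApp c).2 (Or.inr hc)
          have hcB : c ∈ lvlB := by
            rcases (hmemS c).1 hcS with h | h
            · exact absurd h (hdisj c hc)
            · exact h
          exact pv_M_of_mem lvlA b c (hBsubA c hcB) hin
        · -- h2': a bag matched by lvlA has its prefix recorded or is matched by nxt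
          intro b hb hm
          obtain ⟨c, hc, hin⟩ := pv_mem_of_M lvlA b hm
          by_cases hcn : c ∈ nxt
          · exact Or.inr (pv_M_of_mem nxt b c hcn hin)
          · by_cases hcF : c ∈ Fb
            · refine Or.inl ((hmemS _).2 (Or.inr ?_))
              exact (pv_mem_level data Fb (pvPfx b)).2 ⟨b, hb, pv_M_of_mem Fb b c hcF hin, rfl⟩
            · by_cases hcs : c ∈ seen
              · exact Or.inl ((hmemS _).2 (Or.inl (h3 c hcs hcF b hb hin)))
              · exfalso
                obtain ⟨b', hb', hm', hc'⟩ := (pv_mem_level data Fa c).1 hc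
                rcases h2 b' hb' hm' with h | h
                · exact hcs (hc' ▸ h)
                · have : c ∈ lvlB := (pv_mem_level data Fb c).2 ⟨b', hb', h, hc'⟩
                  rcases (hmemApp c).1 ((hmemS c).2 (Or.inr this)) with h' | h'
                  · exact hcs h'
                  · exact hcn h'
        · -- h3': the new seen list is closed off its own frontier
          intro c hc hcn b hb hin
          have hcs : c ∈ seen := by
            rcases (hmemApp c).1 hc with h | h
            · exact h
            · exact absurd h hcn
          by_cases hcF : c ∈ Fb
          · exact (hmemS _).2 (Or.inr ((pv_mem_level data Fb (pvPfx b)).2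
              ⟨b, hb, pv_M_of_mem Fb b c hcF hin, rfl⟩))
          · exact (hmemS _).2 (Or.inl (h3 c hcs hcF b hb hin))

-- ===== VERDICT (by name: the statement is the Claim_ definition above) =====
theorem checkBag_spec : Claim_equal_checkBag := by
  intro data bagColours _ _
  show checkBag data bagColours = checkBag_alt data bagColours
  have hA : checkBag data bagColours = pvCan data (data.length + 2) [] bagColours := by
    have h := pv_A_eq_can data (data.length + 2) bagColours []
    rw [show PySem.Set.update ([] : PySem.Set String) (checkBagFuel data (data.length + 2) bagColours)
          = PySem.Set.ofList (checkBagFuel data (data.length + 2) bagColours) from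
        PySem.Set.update_nil_left _,
      PySem.Set.ofList_eq_self_of_nodup _ (pv_A_nodup data (data.length + 2) bagColours)] at h
    exact h
  have hB : checkBag_alt data bagColours = pvCan data (data.length + 2) [] bagColours := by
    have hloop : checkBagAltLoop data (data.length + 2) [] bagColours
        = pvCan data (data.length + 2) [] bagColours := by
      refine pv_B_eq_can data (data.length + 2) [] bagColours bagColours List.nodup_nil
        (fun b _ h => h) (fun b _ h => Or.inr h) ?_
      intro c hc
      exact absurd hc (List.not_mem_nil)
    have hnd : (checkBagAltLoop data (data.length + 2) [] bagColours).Nodup := by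
      rw [hloop, ← hA]
      exact pv_A_nodup data (data.length + 2) bagColours
    rw [checkBag_alt, PySem.Set.ofList_eq_self_of_nodup _ hnd, hloop]
  rw [hA, hB]
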